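-- pv_equiv track=rewrite | github.com/0xCapy/quadraped_RL_CPG | script/test_stance.py | find_nested_paths
-- ===== SOURCE A (Python) =====
-- from typing import Dict, List, Tuple
--
-- def find_nested_paths(paths: List[str]) -> List[Tuple[str, str]]:
--     nested: List[Tuple[str, str]] = []
--     spaths = sorted(paths)
--     for i, a in enumerate(spaths):
--         for b in spaths[i + 1 :]:
--             if b.startswith(a + "/"):
--                 nested.append((a, b))
--     return nested
-- ===== SOURCE B (Python) =====
-- from typing import List, Tuple
--
-- def find_nested_paths(paths: List[str]) -> List[Tuple[str, str]]:
--     # Sorted order puts every descendant of a path p in one contiguous block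
--     # (the strings between p + "/" and the first string not extending p + "/"),
--     # so for each anchor we skip the few entries below p + "/" and then read the
--     # block off directly, instead of testing every later entry with startswith.
--     spaths = sorted(paths)
--     n = len(spaths)
--     res: List[Tuple[str, str]] = []
--     for i, a in enumerate(spaths):
--         prefix = a + "/"
--         j = i + 1
--         while j < n and spaths[j] < prefix:
--             j += 1
--         while j < n and spaths[j].startswith(prefix):
--             res.append((a, spaths[j]))
--             j += 1
--     return res
-- ===== Notes on version B (the rewrite author's own statement) =====
-- stated objective: faster
-- what changed: Instead of testing every later entry of the sorted list with startswith for each anchor, B uses the fact that sorted order makes the descendants of a path one contiguous block: per anchor it skips the few entries below prefix and then reads the block off directly, stopping at its end.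
import Mathlib
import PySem

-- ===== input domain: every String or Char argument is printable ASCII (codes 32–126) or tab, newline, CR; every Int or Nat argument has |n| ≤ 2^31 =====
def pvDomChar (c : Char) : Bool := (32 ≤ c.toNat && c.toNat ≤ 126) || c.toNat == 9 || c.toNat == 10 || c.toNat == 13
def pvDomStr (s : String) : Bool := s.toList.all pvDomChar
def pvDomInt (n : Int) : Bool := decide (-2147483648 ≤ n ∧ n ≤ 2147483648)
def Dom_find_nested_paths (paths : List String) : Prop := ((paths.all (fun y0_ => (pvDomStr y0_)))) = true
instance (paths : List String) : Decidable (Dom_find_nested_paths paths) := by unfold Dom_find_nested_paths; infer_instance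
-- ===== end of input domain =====

-- B replaces A's full scan of all later entries by a skip-then-read of the contiguous
-- descendant block that sorted order guarantees (objective: faster, same results).

-- ===== PORT A =====
def find_nested_paths (paths : List String) : List (String × String) :=
  let spaths := PySem.List.sorted paths (fun s => s)
  (PySem.List.enumerate spaths 0).foldl
    (fun nested ia =>
      (PySem.List.slice spaths (some (ia.1 + 1)) none).foldl
        (fun nested b =>
          if PySem.Str.startswith b (ia.2 ++ "/") then nested ++ [(ia.2, b)] else nested)
        nested)
    []

-- ===== PORT B =====
-- first while loop of Source B: advance past the entries below the prefix
def pvSkipBelow (pre : String) : List String → List String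
  | [] => []
  | b :: t => if b < pre then pvSkipBelow pre t else b :: t

-- second while loop of Source B: append (a, b) while the entries extend the prefix
def pvTakeNested (a pre : String) : List (String × String) → List String → List (String × String)
  | res, [] => res
  | res, b :: t =>
      if PySem.Str.startswith b pre then pvTakeNested a pre (res ++ [(a, b)]) t else res

def find_nested_paths_alt (paths : List String) : List (String × String) :=
  let spaths := PySem.List.sorted paths (fun s => s)
  (PySem.List.enumerate spaths 0).foldl
    (fun res ia =>
      pvTakeNested ia.2 (ia.2 ++ "/") res (pvSkipBelow (ia.2 ++ "/") (spaths.drop (ia.1 + 1).toNat)))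
    []

-- ===== PRECONDITION & SPEC =====
def Spec_find_nested_paths (paths : List String) (out : List (String × String)) : Prop := out = find_nested_paths_alt paths
instance (paths : List String) (out : List (String × String)) : Decidable (Spec_find_nested_paths paths out) := by unfold Spec_find_nested_paths; infer_instance

-- ===== CLAIM (what is proved, stated in full; the proofs are below) =====
def Claim_equal_find_nested_paths : Prop := ∀ (paths : List String), Dom_find_nested_paths paths → Spec_find_nested_paths paths (find_nested_paths paths)

-- ===== LEMMAS AND PROOFS =====

-- a prefix of a list is ≤ it in the lexicographic order
theorem pv_prefix_le (p b : List Char) (h : p <+: b) : p ≤ b := by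
  obtain ⟨r, rfl⟩ := h
  induction p with
  | nil =>
    cases r with
    | nil => exact le_refl _
    | cons y t => exact le_of_lt (List.Lex.nil)
  | cons x t ih =>
    rcases lt_or_eq_of_le ih with h | h
    · exact le_of_lt (List.Lex.cons h)
    · exact le_of_eq (by rw [List.cons_append, ← h])

-- if p < c without being a prefix of c, everything with prefix p is < c
theorem pv_lex_key (p : List Char) : ∀ c d, p < c → ¬ p <+: c → p <+: d → d < c := by
  induction p with
  | nil => intro c d h1 h2 h3; exact absurd (List.nil_prefix) h2
  | cons x p' ih =>
    intro c d h1 h2 h3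
    cases c with
    | nil => exact absurd h1 List.not_lex_nil
    | cons y c' =>
      obtain ⟨r, rfl⟩ := h3
      rcases List.cons_lex_cons_iff.mp h1 with hxy | ⟨rfl, hlt⟩
      · exact List.Lex.rel hxy
      · have hnp : ¬ p' <+: c' := fun hp => h2 (List.cons_prefix_cons.mpr ⟨rfl, hp⟩)
        exact List.Lex.cons (ih c' (p' ++ r) hlt hnp ⟨r, rfl⟩)

-- string versions
theorem pv_sw_le {pre b : String} (h : PySem.Str.startswith b pre = true) : pre ≤ b := by
  rw [PySem.Str.startswith_eq, PySem.Chars.startswith_iff] at h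
  exact String.le_iff_toList_le.mpr (pv_prefix_le _ _ h)

theorem pv_sw_mono {pre b c : String} (hb : ¬ PySem.Str.startswith b pre = true)
    (hb2 : ¬ b < pre) (hbc : b ≤ c) : ¬ PySem.Str.startswith c pre = true := by
  intro hc
  rw [PySem.Str.startswith_eq, PySem.Chars.startswith_iff] at hb hc
  have hpb : pre < b := by
    rcases lt_or_eq_of_le (le_of_not_gt hb2) with h | h
    · exact h
    · exact absurd (h ▸ List.prefix_refl _) hb
  have : c < b := String.lt_iff_toList_lt.mpr
    (pv_lex_key pre.toList b.toList c.toList (String.lt_iff_toList_lt.mp hpb) hb hc)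
  exact absurd hbc (not_le.mpr this)

theorem pv_takeNested_eq (a pre : String) :
    ∀ (l : List String) (res : List (String × String)),
      pvTakeNested a pre res l =
        res ++ (l.takeWhile (fun b => PySem.Str.startswith b pre)).map (fun b => (a, b)) := by
  intro l
  induction l with
  | nil => intro res; simp [pvTakeNested]
  | cons b t ih =>
    intro res
    simp only [pvTakeNested, List.takeWhile_cons]
    by_cases h : PySem.Str.startswith b pre = true
    · rw [if_pos h, if_pos h, ih]; simp
    · rw [if_neg h, if_neg h]; simp

theorem pv_skipBelow_eq_self (pre : String) (t : List String) (h : ∀ c ∈ t, ¬ c < pre) :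
    pvSkipBelow pre t = t := by
  cases t with
  | nil => rfl
  | cons c t' => simp [pvSkipBelow, h c (List.mem_cons_self)]

-- on a sorted list, skipping the entries below the prefix and reading while the prefix
-- extends is the same as filtering the whole list by the prefix test
theorem pv_window (pre : String) (l : List String) (hl : l.Pairwise (· ≤ ·)) :
    (pvSkipBelow pre l).takeWhile (fun b => PySem.Str.startswith b pre) =
      l.filter (fun b => PySem.Str.startswith b pre) := by
  induction l with
  | nil => rfl
  | cons b t ih =>
    have hb := (List.pairwise_cons.mp hl).1
    have ht := (List.pairwise_cons.mp hl).2
    by_cases hlt : b < pre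
    · have hnb : ¬ PySem.Str.startswith b pre = true := fun h => absurd hlt (not_lt.mpr (pv_sw_le h))
      simp only [pvSkipBelow, if_pos hlt, List.filter_cons]
      rw [if_neg hnb]
      exact ih ht
    · simp only [pvSkipBelow, if_neg hlt, List.takeWhile_cons, List.filter_cons]
      by_cases hsw : PySem.Str.startswith b pre = true
      · have hts : pvSkipBelow pre t = t :=
          pv_skipBelow_eq_self pre t (fun c hc => not_lt.mpr (le_trans (pv_sw_le hsw) (hb c hc)))
        have hiht := ih ht
        rw [hts] at hiht
        rw [if_pos hsw, if_pos hsw, hiht]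
      · have hnil : t.filter (fun b => PySem.Str.startswith b pre) = [] := by
          rw [List.filter_eq_nil_iff]
          exact fun c hc => pv_sw_mono hsw hlt (hb c hc)
        rw [if_neg hsw, if_neg hsw, hnil]

-- ===== VERDICT (by name: the statement is the Claim_ definition above) =====
theorem find_nested_paths_spec : Claim_equal_find_nested_paths := by
  intro paths _
  unfold Spec_find_nested_paths find_nested_paths find_nested_paths_alt
  apply PySem.List.foldl_congr_mem
  intro acc ia hia
  obtain ⟨k, hk, rfl⟩ := (PySem.List.mem_enumerate_iff _ _ _).mp hia
  set spaths := PySem.List.sorted paths (fun s => s) with hsp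
  have hidx : ((0 : Int) + (k : Int) + 1) = ((k + 1 : Nat) : Int) := by push_cast; ring
  have hslice : PySem.List.slice spaths (some ((0 : Int) + (k : Int) + 1)) none = spaths.drop (k + 1) := by
    rw [hidx, PySem.List.slice_from_natCast]
  have hdrop : (((0 : Int) + (k : Int) + 1).toNat) = k + 1 := by omega
  rw [PySem.List.foldl_append_if (fun b => PySem.Str.startswith b (spaths[k] ++ "/"))
        (fun b => (spaths[k], b)), hslice, pv_takeNested_eq, hdrop,
      pv_window _ _ ((PySem.List.sorted_pairwise paths (fun s => s)).drop)]
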